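-- pv_equiv track=rewrite | github.com/anniexlinn/labs | recipes/lab.py | combined_flat_recipes
-- ===== SOURCE A (Python) =====
-- def add_flat_recipes(flat_recipes):
--     """
--     Given a list of flat_recipe dictionaries that map food items to quantities,
--     return a new overall 'grocery list' dictionary that maps each ingredient name
--     to the sum of its quantities across the given flat recipes.
--
--     For example,
--         add_flat_recipes([{'milk':1, 'chocolate':1}, {'sugar':1, 'milk':2}])
--     should return:
--         {'milk':3, 'chocolate': 1, 'sugar': 1}
--     """
--     result = {}
--
--     if flat_recipes is not None:
--         for ingredient_dict in flat_recipes: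
--             for ingredient in ingredient_dict:
--             # add new key for ingredient if not in dict, otherwise increment
--                 if ingredient not in result:
--                     result[ingredient] = ingredient_dict[ingredient]
--                 else:
--                     result[ingredient] += ingredient_dict[ingredient]
--     return result
--
-- def combined_flat_recipes(flat_recipes):
--     """
--     Given a list of lists of dictionaries, where each inner list represents all
--     the flat recipes for a certain ingredient, compute and return a list of flat
--     recipe dictionaries that represent all the possible combinations of
--     ingredient recipes.
--     """
--     # if list empty, return list with empty dict
--     if not flat_recipes:
--         return [{}]
--     first_recipe = flat_recipes[0]
--     # list to store combinations
--     combos = []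
--     # recursively compute combos for remaining recipe lists
--     remaining_combos = combined_flat_recipes(flat_recipes[1:])
--     for ingredient in first_recipe:
--         for combo in remaining_combos:
--             # combine current ingredient with each remaining combo
--             combined_recipe = add_flat_recipes([combo, ingredient])
--             combos.append(combined_recipe)
--     return combos
-- ===== SOURCE B (Python) =====
-- def _merged(p, d):
--     """Merge flat recipe dicts: copy of p plus d's quantities, summing shared keys."""
--     out = dict(p)
--     for key, qty in d.items():
--         out[key] = out.get(key, 0) + qty
--     return out
--
--
-- def combined_flat_recipes(flat_recipes):
--     """
--     Iteratively build all combinations: fold the recipe lists from the last to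
--     the first, extending each partial combination with every choice for the
--     current ingredient.
--     """
--     partials = [{}]
--     for recipe_list in reversed(flat_recipes):
--         partials = [_merged(p, d) for d in recipe_list for p in partials]
--     return partials
-- ===== Notes on version B (the rewrite author's own statement) =====
-- stated objective: idiomatic
-- what changed: Replaces A's tail recursion with helper-driven pairwise dict addition and nested append loops by a single iterative fold over the reversed list of recipe lists, rebuilding the set of partial combinations each level with a comprehension and a direct two-dict merge; the Lean Pre_ only asks inner association lists to have distinct keys, which every Python dict input satisfies, so no Python input is excluded.
import Mathlib
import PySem

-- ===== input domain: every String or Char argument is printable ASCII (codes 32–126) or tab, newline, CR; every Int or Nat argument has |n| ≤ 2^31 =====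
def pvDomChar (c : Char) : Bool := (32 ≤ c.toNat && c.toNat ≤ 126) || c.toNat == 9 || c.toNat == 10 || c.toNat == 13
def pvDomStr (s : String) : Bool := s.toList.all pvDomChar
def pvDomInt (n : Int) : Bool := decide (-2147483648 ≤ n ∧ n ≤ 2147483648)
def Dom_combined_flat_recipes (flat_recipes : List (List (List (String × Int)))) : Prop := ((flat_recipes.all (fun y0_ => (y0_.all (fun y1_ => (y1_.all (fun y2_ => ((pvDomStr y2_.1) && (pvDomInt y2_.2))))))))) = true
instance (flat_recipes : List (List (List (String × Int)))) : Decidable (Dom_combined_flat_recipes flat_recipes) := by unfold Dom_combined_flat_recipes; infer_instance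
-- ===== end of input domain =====

-- B replaces A's tail recursion + nested append loops by one iterative pass over the
-- reversed list of recipe lists, building each product level with a comprehension
-- (objective: idiomatic/alternative; return value only, neither version mutates its input).

-- ===== PORT A =====
-- add_flat_recipes: result = {}; for d in flat_recipes: for k in d: insert or +=.
-- 'ingredient_dict[ingredient]' is ported as getD … 0: the key is drawn from the
-- dict's own keys, so the Python lookup never raises (exact on such keys).
def add_flat_recipes (flat_recipes : List (List (String × Int))) : List (String × Int) :=
  (flat_recipes.foldl (fun result d =>
      (PySem.Dict.mk d).keys.foldl (fun r k =>
        if r.contains k then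
          r.insert k (r.getD k 0 + (PySem.Dict.mk d).getD k 0)
        else
          r.insert k ((PySem.Dict.mk d).getD k 0)) result)
    PySem.Dict.empty).items
-- ('if flat_recipes is not None' is always true for a list argument and is dropped.)

def combined_flat_recipes (flat_recipes : List (List (List (String × Int)))) : List (List (String × Int)) :=
  match flat_recipes with
  | [] => [[]]                                   -- if not flat_recipes: return [{}]
  | first_recipe :: rest =>
      let remaining_combos := combined_flat_recipes rest
      first_recipe.foldl (fun combos ingredient =>
        remaining_combos.foldl (fun combos combo =>
          combos ++ [add_flat_recipes [combo, ingredient]]) combos) []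

-- ===== PORT B =====
-- _merged(p, d): out = dict(p); for (k, q) in d.items(): out[k] = out.get(k, 0) + q
def pvMerged (p d : List (String × Int)) : List (String × Int) :=
  (d.foldl (fun out kv => out.insert kv.1 (out.getD kv.1 0 + kv.2))
     (p.foldl (fun out kv => out.insert kv.1 kv.2) (PySem.Dict.empty : PySem.Dict String Int))).items

def combined_flat_recipes_alt (flat_recipes : List (List (List (String × Int)))) : List (List (String × Int)) :=
  flat_recipes.reverse.foldl
    (fun partials recipe_list => recipe_list.flatMap (fun d => partials.map (fun p => pvMerged p d)))
    [[]]

-- ===== PRECONDITION & SPEC =====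
-- Pre_ asks every inner association list to have pairwise-distinct keys: the inner
-- lists model Python dicts, whose key sequences are duplicate-free by construction,
-- so no Python input A returns on is excluded (a duplicate-key assoc list does not
-- encode any Python dict).
def Pre_combined_flat_recipes (flat_recipes : List (List (List (String × Int)))) : Prop :=
  ∀ L ∈ flat_recipes, ∀ d ∈ L, (d.map Prod.fst).Nodup
instance (flat_recipes : List (List (List (String × Int)))) : Decidable (Pre_combined_flat_recipes flat_recipes) := by unfold Pre_combined_flat_recipes; infer_instance

def pvWitness_combined_flat_recipes : (List (List (List (String × Int)))) :=
  [[[("milk", 1), ("chocolate", 1)], [("sugar", 2)]], [[("milk", 2)]]]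

def Spec_combined_flat_recipes (flat_recipes : List (List (List (String × Int)))) (out : List (List (String × Int))) : Prop := out = combined_flat_recipes_alt flat_recipes
instance (flat_recipes : List (List (List (String × Int)))) (out : List (List (String × Int))) : Decidable (Spec_combined_flat_recipes flat_recipes out) := by unfold Spec_combined_flat_recipes; infer_instance

-- ===== CLAIM (what is proved, stated in full; the proofs are below) =====
def Claim_equal_combined_flat_recipes : Prop := ∀ (flat_recipes : List (List (List (String × Int)))), Dom_combined_flat_recipes flat_recipes → Pre_combined_flat_recipes flat_recipes → Spec_combined_flat_recipes flat_recipes (combined_flat_recipes flat_recipes)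

-- ===== LEMMAS AND PROOFS =====

-- A's inner loop body is a single insert with an if-valued payload.
theorem loopA_body (r : PySem.Dict String Int) (dd : PySem.Dict String Int) (k : String) :
    (if r.contains k then r.insert k (r.getD k 0 + dd.getD k 0) else r.insert k (dd.getD k 0))
      = r.insert k (if r.contains k then r.getD k 0 + dd.getD k 0 else dd.getD k 0) := by
  by_cases h : r.contains k <;> simp [h]

-- A's per-dict loop (over the dict's keys, looking values up) equals B's per-dict
-- loop (over the pairs), provided the dict's keys are distinct.
theorem loopA_eq_loopB (d : List (String × Int)) (hd : (d.map Prod.fst).Nodup)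
    (r : PySem.Dict String Int) :
    (PySem.Dict.mk d).keys.foldl (fun r k =>
        if r.contains k then
          r.insert k (r.getD k 0 + (PySem.Dict.mk d).getD k 0)
        else
          r.insert k ((PySem.Dict.mk d).getD k 0)) r
      = d.foldl (fun out kv => out.insert kv.1 (out.getD kv.1 0 + kv.2)) r := by
  have hkeys : (PySem.Dict.mk d).keys = d.map Prod.fst := by
    simp [PySem.Dict.keys]
  rw [hkeys, List.foldl_map]
  refine PySem.List.foldl_congr_mem d _ _ r ?_
  intro acc kv hkv
  have hval : (PySem.Dict.mk d).getD kv.1 0 = kv.2 := by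
    refine PySem.Dict.getD_of_mem_items (PySem.Dict.mk d) ?_ ?_ 0
    · exact hkv
    · simpa [PySem.Dict.keys] using hd
  rw [loopA_body, hval]
  by_cases h : acc.contains kv.1
  · simp [h]
  · simp [h, PySem.Dict.getD_of_not_contains _ _ (by simpa using h)]

-- Inserting a list of pairwise-distinct fresh keys: the running value lookup is
-- always the default, so B's summing loop collapses to plain insertion.
theorem fresh_fold (c : List (String × Int)) (r : PySem.Dict String Int)
    (hfresh : ∀ kv ∈ c, r.contains kv.1 = false) (hc : (c.map Prod.fst).Nodup) :
    c.foldl (fun out kv => out.insert kv.1 (out.getD kv.1 0 + kv.2)) r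
      = c.foldl (fun out kv => out.insert kv.1 kv.2) r := by
  induction c generalizing r with
  | nil => rfl
  | cons kv t ih =>
      have h0 : r.getD kv.1 0 = 0 :=
        PySem.Dict.getD_of_not_contains r 0 (hfresh kv (by simp))
      simp only [List.foldl_cons, h0, zero_add]
      refine ih (r.insert kv.1 kv.2) ?_ ?_
      · intro kv' hkv'
        rw [PySem.Dict.contains_insert]
        have hne : kv'.1 ≠ kv.1 := by
          simp only [List.map_cons, List.nodup_cons] at hc
          intro h; exact hc.1 (h ▸ List.mem_map_of_mem hkv')
        simp [hne, hfresh kv' (by simp [hkv'])]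
      · simp only [List.map_cons, List.nodup_cons] at hc
        exact hc.2

-- Core pointwise fact: A's add_flat_recipes [combo, ingredient] is B's _merged.
theorem add_eq_merged (c d : List (String × Int))
    (hc : (c.map Prod.fst).Nodup) (hd : (d.map Prod.fst).Nodup) :
    add_flat_recipes [c, d] = pvMerged c d := by
  unfold add_flat_recipes pvMerged
  simp only [List.foldl_cons, List.foldl_nil]
  rw [loopA_eq_loopB c hc, loopA_eq_loopB d hd,
      fresh_fold c PySem.Dict.empty (by intro kv _; simp [PySem.Dict.contains_empty]) hc]

-- A in product form (no hypotheses): unfolding the two append loops.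
theorem A_cons (L : List (List (String × Int))) (rest : List (List (List (String × Int)))) :
    combined_flat_recipes (L :: rest)
      = L.flatMap (fun d => (combined_flat_recipes rest).map (fun c => add_flat_recipes [c, d])) := by
  show L.foldl (fun combos ingredient =>
        (combined_flat_recipes rest).foldl (fun combos combo =>
          combos ++ [add_flat_recipes [combo, ingredient]]) combos) []
      = _
  have h : ∀ (acc : List (List (String × Int))) (d : List (String × Int)),
      (combined_flat_recipes rest).foldl (fun combos combo =>
          combos ++ [add_flat_recipes [combo, d]]) acc
        = acc ++ (combined_flat_recipes rest).map (fun c => add_flat_recipes [c, d]) := by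
    intro acc d
    exact PySem.List.foldl_append_singleton_eq_map _ _ _
  calc L.foldl (fun combos ingredient =>
        (combined_flat_recipes rest).foldl (fun combos combo =>
          combos ++ [add_flat_recipes [combo, ingredient]]) combos) []
      = L.foldl (fun combos ingredient =>
          combos ++ (combined_flat_recipes rest).map (fun c => add_flat_recipes [c, ingredient])) [] := by
        exact PySem.List.foldl_congr_mem L _ _ [] (fun acc x _ => h acc x)
    _ = _ := by
        simpa using PySem.List.foldl_append_eq_flatMap
          (fun d => (combined_flat_recipes rest).map (fun c => add_flat_recipes [c, d])) L []

-- B in product form: one step of the reversed fold.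
theorem B_cons (L : List (List (String × Int))) (rest : List (List (List (String × Int)))) :
    combined_flat_recipes_alt (L :: rest)
      = L.flatMap (fun d => (combined_flat_recipes_alt rest).map (fun p => pvMerged p d)) := by
  unfold combined_flat_recipes_alt
  rw [List.reverse_cons, List.foldl_append]
  rfl

-- add_flat_recipes always returns a duplicate-free-key dict (it is the items list
-- of a Dict built from empty by inserts).
theorem add_nodup (frs : List (List (String × Int))) :
    ((add_flat_recipes frs).map Prod.fst).Nodup := by
  unfold add_flat_recipes
  have : ∀ (acc : PySem.Dict String Int), acc.keys.Nodup →
      (frs.foldl (fun result d =>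
        (PySem.Dict.mk d).keys.foldl (fun r k =>
          if r.contains k then
            r.insert k (r.getD k 0 + (PySem.Dict.mk d).getD k 0)
          else
            r.insert k ((PySem.Dict.mk d).getD k 0)) result) acc).keys.Nodup := by
    intro acc hacc
    induction frs generalizing acc with
    | nil => exact hacc
    | cons d t ih =>
        simp only [List.foldl_cons]
        refine ih _ ?_
        beta_reduce
        have hb := PySem.List.foldl_congr_mem (PySem.Dict.mk d).keys
          (fun r k => if r.contains k then r.insert k (r.getD k 0 + (PySem.Dict.mk d).getD k 0)
                      else r.insert k ((PySem.Dict.mk d).getD k 0))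
          (fun r k => r.insert k (if r.contains k then r.getD k 0 + (PySem.Dict.mk d).getD k 0
                      else (PySem.Dict.mk d).getD k 0)) acc
          (fun r k _ => loopA_body r (PySem.Dict.mk d) k)
        rw [hb]
        exact PySem.Dict.nodup_keys_foldl_insert _ _ acc hacc
  exact this PySem.Dict.empty (by simp [PySem.Dict.keys, PySem.Dict.empty])

-- Invariant: every combination A returns has duplicate-free keys.
theorem A_mem_nodup (frs : List (List (List (String × Int)))) :
    ∀ c ∈ combined_flat_recipes frs, (c.map Prod.fst).Nodup := by
  induction frs with
  | nil =>
      intro c hc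
      simp [combined_flat_recipes] at hc
      simp [hc]
  | cons L rest ih =>
      intro c hc
      rw [A_cons] at hc
      obtain ⟨d, _, c', _, rfl⟩ := by simpa using hc
      exact add_nodup [c', d]

theorem main_eq (frs : List (List (List (String × Int))))
    (hpre : Pre_combined_flat_recipes frs) :
    combined_flat_recipes frs = combined_flat_recipes_alt frs := by
  induction frs with
  | nil => rfl
  | cons L rest ih =>
      have hrest : Pre_combined_flat_recipes rest := fun L' hL' => hpre L' (by simp [hL'])
      rw [A_cons, B_cons, ← ih hrest]
      refine List.flatMap_congr ?_
      intro d hd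
      refine List.map_congr_left ?_
      intro c hc
      exact add_eq_merged c d (A_mem_nodup rest c hc) (hpre L (by simp) d hd)

-- ===== VERDICT (by name: the statement is the Claim_ definition above) =====
theorem combined_flat_recipes_spec : Claim_equal_combined_flat_recipes := by
  intro frs _ hpre
  unfold Spec_combined_flat_recipes
  exact main_eq frs hpre
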